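-- pv_equiv track=rewrite | github.com/eesoyeon/Algorithm | 프로그래머스/1/160586. 대충 만든 자판/대충 만든 자판.py | solution
-- ===== SOURCE A (Python) =====
-- def solution(keymap, targets):
--     answer = []
--     key_dict = {}
--
--     for keys in keymap:
--         for i, key in enumerate(keys):
--             if key not in key_dict:
--                 key_dict[key] = i+1
--             else:
--                 key_dict[key] = min(key_dict[key], i+1)
--
--     for target in targets:
--         cnt = 0
--         for t in target:
--             if t in key_dict:
--                 cnt += key_dict[t]
--             else:
--                 cnt = -1
--                 break
--         answer.append(cnt)
--
--
--     return answer
-- ===== SOURCE B (Python) =====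
-- def _first_pos(keys, ch):
--     for i, k in enumerate(keys):
--         if k == ch:
--             return i + 1
--     return None
--
--
-- def solution(keymap, targets):
--     answer = []
--     for target in targets:
--         total = 0
--         for ch in target:
--             best = None
--             for keys in keymap:
--                 p = _first_pos(keys, ch)
--                 if p is not None and (best is None or p < best):
--                     best = p
--             if best is None:
--                 total = -1
--                 break
--             total += best
--         answer.append(total)
--     return answer
-- ===== Notes on version B (the rewrite author's own statement) =====
-- stated objective: alternative
-- what changed: Drops the precomputed min-index dictionary entirely: for each target character it scans every keymap string for its first occurrence (early-return helper) and takes the smallest 1-based position across keymaps on the fly.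
import Mathlib
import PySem

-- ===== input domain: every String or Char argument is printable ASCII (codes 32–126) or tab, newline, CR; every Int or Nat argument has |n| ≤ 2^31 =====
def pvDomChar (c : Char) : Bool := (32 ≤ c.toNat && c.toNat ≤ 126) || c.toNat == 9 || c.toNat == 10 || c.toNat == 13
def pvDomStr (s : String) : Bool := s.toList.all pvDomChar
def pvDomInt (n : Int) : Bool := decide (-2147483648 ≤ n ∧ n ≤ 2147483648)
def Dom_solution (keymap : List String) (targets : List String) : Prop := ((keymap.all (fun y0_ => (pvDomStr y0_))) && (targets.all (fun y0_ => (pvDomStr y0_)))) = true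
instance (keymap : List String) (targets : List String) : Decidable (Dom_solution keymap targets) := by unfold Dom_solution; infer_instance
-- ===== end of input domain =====

-- B drops A's precomputed min-index dictionary: per target character it scans every
-- keymap string for the first occurrence and takes the minimum position directly (alternative decomposition).


-- ===== PORT A =====
-- inner `for t in target` loop with break, on the prebuilt dict
def solCnt (d : PySem.Dict Char Int) : List Char → Int → Int
  | [], cnt => cnt
  | t :: ts, cnt =>
    match d.get? t with
    | some v => solCnt d ts (cnt + v)
    | none => -1

def solution (keymap : List String) (targets : List String) : List Int :=
  let keyDict : PySem.Dict Char Int :=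
    keymap.foldl (fun d keys =>
      (PySem.List.enumerate keys.toList 0).foldl (fun d p =>
        match d.get? p.2 with
        | none => d.insert p.2 (p.1 + 1)
        | some v => d.insert p.2 (min v (p.1 + 1))) d) PySem.Dict.empty
  targets.foldl (fun answer target => answer ++ [solCnt keyDict target.toList 0]) []

-- ===== PORT B =====
-- _first_pos: early-return scan of one keymap string, 1-based position
def firstPos : List Char → Char → Int → Option Int
  | [], _, _ => none
  | k :: ks, ch, i => if k = ch then some (i + 1) else firstPos ks ch (i + 1)

-- the `for keys in keymap` scan computing the minimum position for one character
def bestOf (keymap : List String) (ch : Char) : Option Int :=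
  keymap.foldl (fun best keys =>
    match firstPos keys.toList ch 0, best with
    | some p, none => some p
    | some p, some b => if p < b then some p else some b
    | none, b => b) none

-- the `for ch in target` loop with break
def altCnt (keymap : List String) : List Char → Int → Int
  | [], total => total
  | ch :: cs, total =>
    match bestOf keymap ch with
    | none => -1
    | some b => altCnt keymap cs (total + b)

def solution_alt (keymap : List String) (targets : List String) : List Int :=
  targets.foldl (fun answer target => answer ++ [altCnt keymap target.toList 0]) []

-- ===== PRECONDITION & SPEC =====
def Spec_solution (keymap : List String) (targets : List String) (out : List Int) : Prop := out = solution_alt keymap targets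
instance (keymap : List String) (targets : List String) (out : List Int) : Decidable (Spec_solution keymap targets out) := by unfold Spec_solution; infer_instance

-- ===== CLAIM (what is proved, stated in full; the proofs are below) =====
def Claim_equal_solution : Prop := ∀ (keymap : List String) (targets : List String), Dom_solution keymap targets → Spec_solution keymap targets (solution keymap targets)

-- ===== LEMMAS AND PROOFS =====

lemma firstPos_ge (l : List Char) (c : Char) (i p : Int) (h : firstPos l c i = some p) :
    i + 1 ≤ p := by
  induction l generalizing i with
  | nil => simp [firstPos] at h
  | cons k ks ih =>
    simp only [firstPos] at h
    split at h
    · cases h; omega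
    · exact le_trans (by omega) (ih (i + 1) h)

-- processing one keymap string updates get? c exactly like combining with firstPos
lemma one_string (l : List Char) (c : Char) :
    ∀ (i : Int) (d : PySem.Dict Char Int),
    ((PySem.List.enumerate l i).foldl (fun d p =>
        match d.get? p.2 with
        | none => d.insert p.2 (p.1 + 1)
        | some v => d.insert p.2 (min v (p.1 + 1))) d).get? c =
      match firstPos l c i, d.get? c with
      | some p, none => some p
      | some p, some b => if p < b then some p else some b
      | none, o => o := by
  induction l with
  | nil => intro i d; simp [PySem.List.enumerate_nil, firstPos]
  | cons k ks ih =>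
    intro i d
    rw [PySem.List.enumerate_cons, List.foldl_cons]
    by_cases hk : k = c
    · subst hk
      simp only [firstPos]
      cases hd : d.get? k with
      | none =>
        simp only [ih]
        have hself : ((d.insert k (i + 1)).get? k) = some (i + 1) := by
          simp [PySem.Dict.get?_insert_self]
        cases hfp : firstPos ks k (i + 1) with
        | none => simp [hself]
        | some p =>
          have hp := firstPos_ge ks k (i + 1) p hfp
          simp only [hself]
          have : ¬ p < i + 1 := by omega
          simp [this]
      | some v =>
        simp only [ih]
        have hself : ((d.insert k (min v (i + 1))).get? k) = some (min v (i + 1)) := by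
          simp [PySem.Dict.get?_insert_self]
        cases hfp : firstPos ks k (i + 1) with
        | none =>
          simp only [hself, ite_true]
          by_cases h1 : i + 1 < v
          · rw [if_pos h1, min_eq_right h1.le]
          · rw [if_neg h1, min_eq_left (by omega)]
        | some p =>
          have hp := firstPos_ge ks k (i + 1) p hfp
          simp only [hself, ite_true]
          have hnp : ¬ p < min v (i + 1) := by
            have : min v (i + 1) ≤ i + 1 := min_le_right v (i + 1)
            omega
          rw [if_neg hnp]
          by_cases h1 : i + 1 < v
          · rw [if_pos h1, min_eq_right h1.le]
          · rw [if_neg h1, min_eq_left (by omega)]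
    · have hne : c ≠ k := fun h => hk h.symm
      have hget : ∀ w, ((d.insert k w).get? c) = d.get? c := fun w =>
        PySem.Dict.get?_insert_of_ne d w hne
      simp only [firstPos, if_neg hk, ih]
      cases hd : d.get? k <;> simp [hget]

-- the whole dict build: lookup equals B's fold over keymaps
lemma build_eq (keymap : List String) :
    ∀ (d : PySem.Dict Char Int) (c : Char),
    (keymap.foldl (fun d keys =>
      (PySem.List.enumerate keys.toList 0).foldl (fun d p =>
        match d.get? p.2 with
        | none => d.insert p.2 (p.1 + 1)
        | some v => d.insert p.2 (min v (p.1 + 1))) d) d).get? c =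
    keymap.foldl (fun best keys =>
      match firstPos keys.toList c 0, best with
      | some p, none => some p
      | some p, some b => if p < b then some p else some b
      | none, b => b) (d.get? c) := by
  induction keymap with
  | nil => intro d c; rfl
  | cons keys km ih =>
    intro d c
    rw [List.foldl_cons, List.foldl_cons, ih, one_string]

lemma lookup_eq_bestOf (keymap : List String) (c : Char) :
    (keymap.foldl (fun d keys =>
      (PySem.List.enumerate keys.toList 0).foldl (fun d p =>
        match d.get? p.2 with
        | none => d.insert p.2 (p.1 + 1)
        | some v => d.insert p.2 (min v (p.1 + 1))) d) PySem.Dict.empty).get? c = bestOf keymap c := by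
  rw [build_eq, bestOf, PySem.Dict.get?_empty]

lemma cnt_eq (keymap : List String) (l : List Char) :
    ∀ cnt : Int,
    solCnt (keymap.foldl (fun d keys =>
      (PySem.List.enumerate keys.toList 0).foldl (fun d p =>
        match d.get? p.2 with
        | none => d.insert p.2 (p.1 + 1)
        | some v => d.insert p.2 (min v (p.1 + 1))) d) PySem.Dict.empty) l cnt
      = altCnt keymap l cnt := by
  induction l with
  | nil => intro cnt; rfl
  | cons ch cs ih =>
    intro cnt
    simp only [solCnt, altCnt, lookup_eq_bestOf]
    cases bestOf keymap ch <;> simp [ih]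

-- ===== VERDICT (by name: the statement is the Claim_ definition above) =====
theorem solution_spec : Claim_equal_solution := by
  intro keymap targets _
  unfold Spec_solution solution solution_alt
  induction targets using List.reverseRecOn with
  | nil => rfl
  | append_singleton ts t ih =>
    simp only [List.foldl_append, List.foldl_cons, List.foldl_nil, cnt_eq]
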